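-- pv_equiv track=rewrite | github.com/craigtrim/fast-sentence-segment | fast_sentence_segment/dmo/list_marker_normalizer.py | _marker_to_placeholder
-- ===== SOURCE A (Python) =====
-- PLACEHOLDER_PREFIX = "xlm"
--
-- PLACEHOLDER_SUFFIX = "x"
--
-- def _marker_to_placeholder(marker: str) -> str:
--     """Convert a list marker to a deterministic placeholder.
--
--     Encodes the marker type and value in the placeholder so it can
--     be restored without maintaining state. Uses short codes to avoid
--     confusing spaCy's sentence boundary detection.
--
--     Examples:
--         "1." -> "xlm1dx"
--         "1.)" -> "xlm1dpx"
--         "a." -> "xlmadx"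
--         "A." -> "xlmuadx" (u prefix for uppercase)
--         "ii)" -> "xlmiipx"
--     """
--     # Preserve case info: uppercase letters get 'u' prefix
--     encoded = ""
--     for char in marker:
--         if char.isupper():
--             encoded += 'u' + char.lower()
--         else:
--             encoded += char
--
--     # Encode punctuation with single letters
--     encoded = encoded.replace('.)', 'dp')  # Period+paren combo first
--     encoded = encoded.replace('.', 'd')     # d for dot
--     encoded = encoded.replace(')', 'p')     # p for paren
--
--     return f"{PLACEHOLDER_PREFIX}{encoded}{PLACEHOLDER_SUFFIX}"
-- ===== SOURCE B (Python) =====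
-- def _marker_to_placeholder(marker: str) -> str:
--     """Single left-to-right pass with one-char lookahead instead of
--     build-then-three-replaces."""
--     out = []
--     i = 0
--     n = len(marker)
--     while i < n:
--         c = marker[i]
--         if c == '.' and i + 1 < n and marker[i + 1] == ')':
--             out.append('dp')
--             i += 2
--         elif c == '.':
--             out.append('d')
--             i += 1
--         elif c == ')':
--             out.append('p')
--             i += 1
--         elif c.isupper():
--             out.append('u' + c.lower())
--             i += 1
--         else:
--             out.append(c)
--             i += 1
--     return "xlm" + "".join(out) + "x"
-- ===== Notes on version B (the rewrite author's own statement) =====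
-- stated objective: simpler
-- what changed: Replaces the build-then-three-sequential-str.replace design with a single left-to-right pass over the marker using one-character lookahead for the period-paren combination and encoding each character directly as it is scanned.
import Mathlib
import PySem

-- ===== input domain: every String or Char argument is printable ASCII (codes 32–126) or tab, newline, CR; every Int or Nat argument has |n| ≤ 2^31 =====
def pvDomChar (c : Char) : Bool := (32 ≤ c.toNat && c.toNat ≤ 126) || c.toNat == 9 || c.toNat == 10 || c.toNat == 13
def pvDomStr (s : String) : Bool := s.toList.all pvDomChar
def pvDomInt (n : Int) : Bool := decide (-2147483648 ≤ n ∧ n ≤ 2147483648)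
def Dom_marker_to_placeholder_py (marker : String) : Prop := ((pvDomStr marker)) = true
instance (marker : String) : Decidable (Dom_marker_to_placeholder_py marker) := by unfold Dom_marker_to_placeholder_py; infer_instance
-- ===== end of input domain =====

-- B replaces A's build-then-three-str.replace design by a single left-to-right
-- pass with one-character lookahead; same return value on every input (objective: simpler).

-- ===== PORT A =====
def PLACEHOLDER_PREFIX : List Char := "xlm".toList
def PLACEHOLDER_SUFFIX : List Char := "x".toList

def marker_to_placeholder_py (marker : String) : String :=
  -- encoded = ""; for char in marker: encoded += 'u' + char.lower() if upper else char
  let encoded : List Char :=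
    marker.toList.foldl
      (fun acc c =>
        if PySem.Chars.isupper c then acc ++ ['u', PySem.Chars.lowerChar c]
        else acc ++ [c]) []
  let e1 := PySem.Chars.replace encoded ['.', ')'] ['d', 'p']
  let e2 := PySem.Chars.replace e1 ['.'] ['d']
  let e3 := PySem.Chars.replace e2 [')'] ['p']
  String.ofList (PLACEHOLDER_PREFIX ++ e3 ++ PLACEHOLDER_SUFFIX)

-- ===== PORT B =====
-- the body of Source B's loop when no '.)' lookahead fires (the elif chain)
def altChar (c : Char) : List Char :=
  if c = '.' then ['d']
  else if c = ')' then ['p']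
  else if PySem.Chars.isupper c then ['u', PySem.Chars.lowerChar c]
  else [c]

-- Source B's while-loop: one pass, one-character lookahead
def altGo : List Char → List Char
  | [] => []
  | [c] => altChar c
  | c :: d :: t =>
    if c = '.' ∧ d = ')' then 'd' :: 'p' :: altGo t
    else altChar c ++ altGo (d :: t)

def marker_to_placeholder_py_alt (marker : String) : String :=
  String.ofList ("xlm".toList ++ altGo marker.toList ++ "x".toList)

-- ===== PRECONDITION & SPEC =====
def Spec_marker_to_placeholder_py (marker : String) (out : String) : Prop := out = marker_to_placeholder_py_alt marker
instance (marker : String) (out : String) : Decidable (Spec_marker_to_placeholder_py marker out) := by unfold Spec_marker_to_placeholder_py; infer_instance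

-- ===== CLAIM (what is proved, stated in full; the proofs are below) =====
def Claim_equal_marker_to_placeholder_py : Prop := ∀ (marker : String), Dom_marker_to_placeholder_py marker → Spec_marker_to_placeholder_py marker (marker_to_placeholder_py marker)

-- ===== LEMMAS AND PROOFS =====

-- A's first replace ('.'+')' -> 'd'+'p'), written as a structural pass
def r1 : List Char → List Char
  | [] => []
  | [c] => [c]
  | c :: d :: t => if c = '.' ∧ d = ')' then 'd' :: 'p' :: r1 t else c :: r1 (d :: t)

-- A's uppercase-encoding loop, as a flatMap
def encF (c : Char) : List Char :=
  if PySem.Chars.isupper c then ['u', PySem.Chars.lowerChar c] else [c]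

-- A's second / third replace (single-char patterns) act as maps
def m2 (c : Char) : Char := if c = '.' then 'd' else c
def m3 (c : Char) : Char := if c = ')' then 'p' else c

theorem encoded_eq_flatMap (l : List Char) :
    l.foldl (fun acc c => if PySem.Chars.isupper c then acc ++ ['u', PySem.Chars.lowerChar c]
                          else acc ++ [c]) [] = l.flatMap encF := by
  have hf : (fun (acc : List Char) c =>
      if PySem.Chars.isupper c then acc ++ ['u', PySem.Chars.lowerChar c] else acc ++ [c])
      = fun acc c => acc ++ encF c := by
    funext acc c
    by_cases h : PySem.Chars.isupper c <;> simp [encF, h]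
  rw [hf, PySem.List.foldl_append_eq_flatMap]
  simp

theorem r1_cons (c : Char) (t : List Char)
    (h : ¬ (c = '.' ∧ t.head? = some ')')) : r1 (c :: t) = c :: r1 t := by
  cases t with
  | nil => rfl
  | cons d t' =>
    rw [r1]
    rw [if_neg]
    intro ⟨h1, h2⟩
    exact h ⟨h1, by simp [h2]⟩

theorem go_pair (fuel : Nat) : ∀ (l acc : List Char), l.length ≤ fuel →
    PySem.Chars.replace.go ['.', ')'] ['d', 'p'] fuel l acc = acc.reverse ++ r1 l := by
  induction fuel with
  | zero =>
    intro l acc h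
    have : l = [] := List.eq_nil_of_length_eq_zero (Nat.le_zero.mp h)
    subst this; simp [PySem.Chars.replace.go, r1]
  | succ n ih =>
    intro l acc h
    match l with
    | [] => simp [PySem.Chars.replace.go, r1]
    | c :: t =>
      rw [PySem.Chars.replace.go]
      simp only [List.length_cons] at h
      by_cases hp : List.isPrefixOf ['.', ')'] (c :: t) = true
      · match t, hp with
        | [], hp => simp [List.isPrefixOf] at hp
        | d :: t', hp =>
          have hp' := hp
          simp [List.isPrefixOf] at hp'
          obtain ⟨hc, hd⟩ := hp'
          cases hc; cases hd
          simp only [hp, if_true]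
          simp only [List.length_cons] at h
          rw [show List.drop (['.', ')'] : List Char).length ('.' :: ')' :: t') = t' from rfl]
          rw [ih t' _ (by omega)]
          rw [show r1 ('.' :: ')' :: t') = 'd' :: 'p' :: r1 t' by rw [r1, if_pos ⟨rfl, rfl⟩]]
          simp
      · simp only [hp, if_false, Bool.false_eq_true]
        rw [ih t (c :: acc) (by omega)]
        rw [r1_cons c t]
        · simp
        · intro ⟨h1, h2⟩
          subst h1
          cases t with
          | nil => simp at h2
          | cons d t' =>
            simp at h2
            subst h2
            exact hp (by simp [List.isPrefixOf])

theorem replace_pair (l : List Char) :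
    PySem.Chars.replace l ['.', ')'] ['d', 'p'] = r1 l := by
  have := go_pair l.length l [] (le_refl _)
  simpa [PySem.Chars.replace] using this

theorem go_single (p q : Char) (fuel : Nat) : ∀ (l acc : List Char), l.length ≤ fuel →
    PySem.Chars.replace.go [p] [q] fuel l acc =
      acc.reverse ++ l.map (fun c => if c = p then q else c) := by
  induction fuel with
  | zero =>
    intro l acc h
    have : l = [] := List.eq_nil_of_length_eq_zero (Nat.le_zero.mp h)
    subst this; simp [PySem.Chars.replace.go]
  | succ n ih =>
    intro l acc h
    match l with
    | [] => simp [PySem.Chars.replace.go]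
    | c :: t =>
      rw [PySem.Chars.replace.go]
      simp only [List.length_cons] at h
      by_cases hc : c = p
      · have hp : List.isPrefixOf [p] (c :: t) = true := by simp [List.isPrefixOf, hc]
        simp only [hp, if_true]
        rw [show List.drop ([p] : List Char).length (c :: t) = t from rfl]
        rw [ih t _ (by omega)]
        simp [hc]
      · have hp : ¬ (List.isPrefixOf [p] (c :: t) = true) := by
          simp [List.isPrefixOf]; exact fun h' => absurd h'.symm hc
        simp only [hp, if_false, Bool.false_eq_true]
        rw [ih t (c :: acc) (by omega)]
        simp [hc]

theorem replace_single (p q : Char) (l : List Char) :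
    PySem.Chars.replace l [p] [q] = l.map (fun c => if c = p then q else c) := by
  have := go_single p q l.length l [] (le_refl _)
  simpa [PySem.Chars.replace] using this

-- a lowered uppercase letter is ASCII lowercase, hence neither '.' nor ')'
theorem toNat_ofNat_small (n : Nat) (h : n < 55296) : (Char.ofNat n).toNat = n := by
  simp [Char.ofNat, Char.ofNatAux, Char.toNat, Nat.isValidChar, h]

theorem lowerChar_toNat (c : Char) (h : PySem.Chars.isupper c = true) :
    (PySem.Chars.lowerChar c).toNat = c.toNat + 32 ∧ 97 ≤ c.toNat + 32 ∧ c.toNat + 32 ≤ 122 := by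
  obtain ⟨h65, h90⟩ : 65 ≤ c.toNat ∧ c.toNat ≤ 90 := by
    simp [PySem.Chars.isupper, Char.le_def] at h
    exact ⟨h.1, h.2⟩
  refine ⟨?_, by omega, by omega⟩
  rw [show PySem.Chars.lowerChar c = Char.ofNat (c.toNat + 32) by
        simp [PySem.Chars.lowerChar, h]]
  exact toNat_ofNat_small _ (by omega)

theorem lowerChar_ne_dot (c : Char) (h : PySem.Chars.isupper c = true) :
    PySem.Chars.lowerChar c ≠ '.' := by
  intro he
  have h2 := lowerChar_toNat c h
  have h1 : ('.' : Char).toNat = c.toNat + 32 := he ▸ h2.1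
  have h46 : ('.' : Char).toNat = 46 := rfl
  omega

theorem lowerChar_ne_paren (c : Char) (h : PySem.Chars.isupper c = true) :
    PySem.Chars.lowerChar c ≠ ')' := by
  intro he
  have h2 := lowerChar_toNat c h
  have h1 : (')' : Char).toNat = c.toNat + 32 := he ▸ h2.1
  have h41 : (')' : Char).toNat = 41 := rfl
  omega

-- one chunk of A's pipeline equals one step of B, given the lookahead does not fire
theorem chunk (c : Char) (rest : List Char)
    (hno : c = '.' → rest.head? ≠ some ')') :
    ((r1 (encF c ++ rest)).map m2).map m3 = altChar c ++ ((r1 rest).map m2).map m3 := by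
  by_cases hdot : c = '.'
  · subst hdot
    rw [show encF '.' = ['.'] from rfl, List.singleton_append]
    rw [r1_cons '.' rest (by intro ⟨_, h2⟩; exact hno rfl h2)]
    simp [altChar, m2, m3]
  · by_cases hpar : c = ')'
    · subst hpar
      rw [show encF ')' = [')'] from rfl, List.singleton_append]
      rw [r1_cons ')' rest (by intro ⟨h1, _⟩; exact absurd h1 (by decide))]
      simp [altChar, m2, m3]
    · by_cases hu : PySem.Chars.isupper c
      · rw [show encF c = ['u', PySem.Chars.lowerChar c] by simp [encF, hu]]
        rw [show (['u', PySem.Chars.lowerChar c] ++ rest)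
              = 'u' :: (PySem.Chars.lowerChar c :: rest) from rfl]
        rw [r1_cons 'u' _ (by intro ⟨h1, _⟩; exact absurd h1 (by decide))]
        rw [r1_cons (PySem.Chars.lowerChar c) rest
              (by intro ⟨h1, _⟩; exact lowerChar_ne_dot c hu h1)]
        simp only [List.map_cons]
        rw [show m2 'u' = 'u' from rfl, show m3 'u' = 'u' from rfl]
        rw [show m2 (PySem.Chars.lowerChar c) = PySem.Chars.lowerChar c by
              simp [m2, lowerChar_ne_dot c hu]]
        rw [show m3 (PySem.Chars.lowerChar c) = PySem.Chars.lowerChar c by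
              simp [m3, lowerChar_ne_paren c hu]]
        simp [altChar, hdot, hpar, hu]
      · rw [show encF c = [c] by simp [encF, hu], List.singleton_append]
        rw [r1_cons c rest (by intro ⟨h1, _⟩; exact hdot h1)]
        simp [altChar, m2, m3, hdot, hpar, hu]

-- head of an encoded chunk: ')' only if the original char is ')'
theorem flatMap_head_paren (d : Char) (t : List Char)
    (hd : d ≠ ')') : ((d :: t).flatMap encF).head? ≠ some ')' := by
  by_cases hu : PySem.Chars.isupper d
  · simp [encF, hu]
  · simp [encF, hu, hd]

-- the composed three-phase pipeline of A equals B's single pass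
theorem pipeline_eq_altGo (l : List Char) :
    ((r1 (l.flatMap encF)).map m2).map m3 = altGo l := by
  fun_induction altGo l with
  | case1 => simp [r1]
  | case2 c =>
    rw [List.flatMap_cons, List.flatMap_nil, List.append_nil,
        show (encF c : List Char) = encF c ++ [] by simp]
    rw [chunk c [] (by simp)]
    simp [r1]
  | case3 c d t hcd ih =>
    obtain ⟨rfl, rfl⟩ := hcd
    rw [List.flatMap_cons, List.flatMap_cons]
    rw [show encF '.' = ['.'] from rfl, show encF ')' = [')'] from rfl]
    simp only [List.singleton_append]
    rw [show r1 ('.' :: ')' :: t.flatMap encF) = 'd' :: 'p' :: r1 (t.flatMap encF) by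
          rw [r1, if_pos ⟨rfl, rfl⟩]]
    simp only [List.map_cons]
    rw [ih]
    rfl
  | case4 c d t hcd ih =>
    rw [List.flatMap_cons]
    rw [chunk c ((d :: t).flatMap encF) ?_]
    · rw [ih]
    · intro hc
      have hd : d ≠ ')' := fun h => hcd ⟨hc, h⟩
      exact flatMap_head_paren d t hd

-- ===== VERDICT (by name: the statement is the Claim_ definition above) =====
theorem marker_to_placeholder_py_spec : Claim_equal_marker_to_placeholder_py := by
  intro marker _
  unfold Spec_marker_to_placeholder_py marker_to_placeholder_py marker_to_placeholder_py_alt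
  simp only [PLACEHOLDER_PREFIX, PLACEHOLDER_SUFFIX]
  rw [encoded_eq_flatMap, replace_pair, replace_single, replace_single]
  rw [show (fun c => if c = '.' then 'd' else c) = m2 from rfl,
      show (fun c => if c = ')' then 'p' else c) = m3 from rfl]
  rw [pipeline_eq_altGo]
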